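-- pv_equiv track=rewrite | github.com/kaisalb/SWU | kabastCSVprocessing.py | get_hatch
-- ===== SOURCE A (Python) =====
-- ASPECT_HATCH = {
--     "Heroism": "\\",
--     "Villainy": "/",
--     "Neutral": "|"
-- }
--
-- def get_hatch(aspects):
--     if not aspects or not isinstance(aspects, list):
--         return ""
--
--     # Heroism and Villany drive the hatch direction.
--     # Currently sourced from the leader aspects.
--     # Convert to strings and handle potential case issues
--     aspect_list = [str(a).strip().title() for a in aspects]
--
--     if "Heroism" in aspect_list:
--         return ASPECT_HATCH["Heroism"]
--     elif "Villainy" in aspect_list: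
--         return ASPECT_HATCH["Villainy"]
--     else:
--         return ASPECT_HATCH["Neutral"]
-- ===== SOURCE B (Python) =====
-- ASPECT_HATCH = {
--     "Heroism": "\\",
--     "Villainy": "/",
--     "Neutral": "|"
-- }
--
-- _RANK = {"Heroism": 2, "Villainy": 1}
-- _HATCH_BY_RANK = ["|", "/", "\\"]
--
-- def get_hatch(aspects):
--     if not aspects or not isinstance(aspects, list):
--         return ""
--     return _HATCH_BY_RANK[max(_RANK.get(str(a).strip().title(), 0) for a in aspects)]
-- ===== Notes on version B (the rewrite author's own statement) =====
-- stated objective: alternative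
-- what changed: Replaces the normalized-list build plus two prioritized membership scans with a rank-maximization: each aspect is mapped to a numeric priority (Heroism=2, Villainy=1, other=0), the maximum rank is taken in one pass, and the hatch is read from a rank-indexed table.
import Mathlib
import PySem

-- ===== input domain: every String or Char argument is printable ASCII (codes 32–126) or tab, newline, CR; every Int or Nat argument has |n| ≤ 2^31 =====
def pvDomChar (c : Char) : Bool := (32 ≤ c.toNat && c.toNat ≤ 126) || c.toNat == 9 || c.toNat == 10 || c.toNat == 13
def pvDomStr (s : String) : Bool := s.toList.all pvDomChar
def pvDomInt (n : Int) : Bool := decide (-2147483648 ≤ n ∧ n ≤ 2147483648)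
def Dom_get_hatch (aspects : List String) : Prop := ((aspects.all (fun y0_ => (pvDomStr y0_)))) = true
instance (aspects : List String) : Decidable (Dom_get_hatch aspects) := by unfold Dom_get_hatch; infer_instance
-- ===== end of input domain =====

-- B replaces the normalized-list build + two prioritized membership scans with a
-- rank-maximization (Heroism=2, Villainy=1, other=0; max rank indexes a hatch table).


-- ===== PORT A =====
def pyTitleAux : Bool → List Char → List Char
  | _, [] => []
  | prevAlpha, c :: rest =>
    if c.isAlpha then
      (if prevAlpha then c.toLower else c.toUpper) :: pyTitleAux true rest
    else c :: pyTitleAux false rest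

-- str.title() for ASCII letters: exact on Dom (cased chars there are exactly A–Z, a–z)
def pyTitle (s : String) : String := String.ofList (pyTitleAux false s.toList)

def normAspect (a : String) : String := pyTitle (PySem.Str.strip a)

def get_hatch (aspects : List String) : String :=
  if aspects = [] then ""
  else
    let aspect_list := aspects.map normAspect
    if aspect_list.contains "Heroism" then "\\"
    else if aspect_list.contains "Villainy" then "/"
    else "|"

-- ===== PORT B =====
def rankAspect (a : String) : Nat :=
  let n := normAspect a
  if n = "Heroism" then 2 else if n = "Villainy" then 1 else 0

def get_hatch_alt (aspects : List String) : String :=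
  if aspects = [] then ""
  else
    let r := (aspects.map rankAspect).foldl Nat.max 0
    ["|", "/", "\\"].getD r ""

-- ===== PRECONDITION & SPEC =====
def Spec_get_hatch (aspects : List String) (out : String) : Prop := out = get_hatch_alt aspects
instance (aspects : List String) (out : String) : Decidable (Spec_get_hatch aspects out) := by unfold Spec_get_hatch; infer_instance

-- ===== CLAIM =====
def Claim_equal_get_hatch : Prop := ∀ (aspects : List String), Dom_get_hatch aspects → Spec_get_hatch aspects (get_hatch aspects)

-- ===== LEMMAS AND PROOFS =====
def hrank (l : List String) : Nat :=
  if l.any (fun a => normAspect a == "Heroism") then 2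
  else if l.any (fun a => normAspect a == "Villainy") then 1 else 0

lemma hrank_cons (x : String) (xs : List String) :
    hrank (x :: xs) = Nat.max (rankAspect x) (hrank xs) := by
  unfold hrank rankAspect
  simp only [List.any_cons, Bool.or_eq_true, List.any_eq_true, beq_iff_eq]
  by_cases h1 : normAspect x = "Heroism" <;>
  by_cases h2 : normAspect x = "Villainy" <;>
  by_cases hh : ∃ a ∈ xs, normAspect a = "Heroism" <;>
  by_cases hv : ∃ a ∈ xs, normAspect a = "Villainy" <;>
  simp only [h1, h2, hh, hv, if_pos, if_neg, not_false_eq_true] <;> rfl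

lemma max_rank_char (l : List String) (b : Nat) :
    (l.map rankAspect).foldl Nat.max b = Nat.max b (hrank l) := by
  induction l generalizing b with
  | nil => simp [hrank]
  | cons x xs ih =>
    simp only [List.map_cons, List.foldl_cons, ih, hrank_cons, Nat.max_assoc]

-- ===== VERDICT =====
theorem get_hatch_spec : Claim_equal_get_hatch := by
  intro aspects _
  unfold Spec_get_hatch get_hatch get_hatch_alt
  by_cases h : aspects = []
  · simp [h]
  · simp only [h, if_false, max_rank_char, Nat.zero_max, hrank,
      List.contains_eq_any_beq, List.any_map, Function.comp_def,
      List.any_eq_true, beq_iff_eq]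
    simp only [show ∀ a : String, ("Heroism" = normAspect a) = (normAspect a = "Heroism")
        from fun a => propext eq_comm,
      show ∀ a : String, ("Villainy" = normAspect a) = (normAspect a = "Villainy")
        from fun a => propext eq_comm]
    by_cases hh : ∃ a ∈ aspects, normAspect a = "Heroism" <;>
    by_cases hv : ∃ a ∈ aspects, normAspect a = "Villainy" <;>
      simp [hh, hv]
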